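-- pv_equiv track=rewrite | github.com/posl/comment_recommendation | script/split_gen/3_time/en/159_C/3.py | get_max_volume
-- ===== SOURCE A (Python) =====
-- def get_max_volume(L):
--     max_volume = 0
--     for i in range(1, L):
--         for j in range(1, L):
--             k = L - i - j
--             if k < 1:
--                 break
--             max_volume = max(max_volume, i * j * k)
--     return max_volume
-- ===== SOURCE B (Python) =====
-- def get_max_volume(L):
--     # closed form: the product i*j*k (i,j,k >= 1, i+j+k = L) is maximal at the
--     # near-equal split of L into three parts
--     if L < 3:
--         return 0
--     q, r = divmod(L, 3)
--     if r == 0: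
--         return q * q * q
--     if r == 1:
--         return q * q * (q + 1)
--     return q * (q + 1) * (q + 1)
-- ===== Notes on version B (the rewrite author's own statement) =====
-- stated objective: faster
-- what changed: replaced the O(L^2) double loop over all splits by the O(1) closed form q,r = divmod(L,3) giving the near-equal three-way split product
import Mathlib
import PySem

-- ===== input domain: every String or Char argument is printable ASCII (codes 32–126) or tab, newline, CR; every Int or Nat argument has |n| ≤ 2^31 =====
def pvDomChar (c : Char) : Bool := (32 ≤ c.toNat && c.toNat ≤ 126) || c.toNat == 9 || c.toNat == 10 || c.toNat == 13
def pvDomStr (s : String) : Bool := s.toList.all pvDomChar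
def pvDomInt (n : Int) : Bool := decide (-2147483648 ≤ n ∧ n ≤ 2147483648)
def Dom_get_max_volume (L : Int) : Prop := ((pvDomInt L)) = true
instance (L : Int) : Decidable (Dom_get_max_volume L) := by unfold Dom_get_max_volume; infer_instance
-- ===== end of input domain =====

-- B replaces A's O(L^2) double loop by the O(1) near-equal three-way split formula (timed measurably faster).

-- ===== PORT A =====
-- inner 'for j' loop of A, with the 'break' modelled by stopping the recursion
def pvInnerA (L i : Int) : List Int → Int → Int
  | [], mv => mv
  | j :: rest, mv =>
    let k := L - i - j
    if k < 1 then mv else pvInnerA L i rest (max mv (i * j * k))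

def get_max_volume (L : Int) : Int :=
  (PySem.List.pyRange 1 L 1).foldl (fun mv i => pvInnerA L i (PySem.List.pyRange 1 L 1) mv) 0

-- ===== PORT B =====
def get_max_volume_alt (L : Int) : Int :=
  if L < 3 then 0
  else
    let q := PySem.Int.floordiv L 3
    let r := PySem.Int.mod L 3
    if r = 0 then q * q * q
    else if r = 1 then q * q * (q + 1)
    else q * (q + 1) * (q + 1)

-- ===== PRECONDITION & SPEC =====
def Spec_get_max_volume (L : Int) (out : Int) : Prop := out = get_max_volume_alt L
instance (L : Int) (out : Int) : Decidable (Spec_get_max_volume L out) := by unfold Spec_get_max_volume; infer_instance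

-- ===== CLAIM (what is proved, stated in full; the proofs are below) =====
def Claim_equal_get_max_volume : Prop := ∀ (L : Int), Dom_get_max_volume L → Spec_get_max_volume L (get_max_volume L)

-- ===== LEMMAS AND PROOFS =====

-- the inner loop never decreases the accumulator
theorem pvInnerA_ge (L i : Int) : ∀ (js : List Int) (mv : Int), mv ≤ pvInnerA L i js mv := by
  intro js
  induction js with
  | nil => intro mv; simp [pvInnerA]
  | cons j rest ih =>
      intro mv
      simp only [pvInnerA]
      split
      · exact le_refl _
      · exact le_trans (le_max_left mv _) (ih _)

-- upper bound: the inner loop stays ≤ M if every admitted product is ≤ M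
theorem pvInnerA_le (L i M : Int) : ∀ (js : List Int) (mv : Int),
    mv ≤ M → (∀ j ∈ js, 1 ≤ L - i - j → i * j * (L - i - j) ≤ M) →
    pvInnerA L i js mv ≤ M := by
  intro js
  induction js with
  | nil => intro mv h _; simpa [pvInnerA] using h
  | cons j rest ih =>
      intro mv h hall
      simp only [pvInnerA]
      split
      · exact h
      · rename_i hk
        refine ih _ (max_le h ?_) (fun j' hj' => hall j' (List.mem_cons_of_mem _ hj'))
        exact hall j (List.mem_cons_self ..) (by omega)

-- lower bound: a product admitted by a sorted inner list is reached
theorem pvInnerA_reach (L i : Int) : ∀ (js : List Int) (mv j : Int),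
    js.Pairwise (· < ·) → j ∈ js → 1 ≤ L - i - j →
    i * j * (L - i - j) ≤ pvInnerA L i js mv := by
  intro js
  induction js with
  | nil => intro mv j _ h; cases h
  | cons a rest ih =>
      intro mv j hpw hmem hk
      rcases List.pairwise_cons.1 hpw with ⟨ha, hpw'⟩
      simp only [pvInnerA]
      rcases List.mem_cons.1 hmem with rfl | hmem'
      · rw [if_neg (by omega)]
        exact le_trans (le_max_right mv _) (pvInnerA_ge L i rest _)
      · have : a < j := ha j hmem'
        rw [if_neg (by omega)]
        exact ih _ j hpw' hmem' hk

-- the outer fold never decreases the accumulator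
theorem pvFoldA_ge (L : Int) : ∀ (l : List Int) (mv : Int),
    mv ≤ l.foldl (fun mv i => pvInnerA L i (PySem.List.pyRange 1 L 1) mv) mv := by
  intro l
  induction l with
  | nil => intro mv; simp
  | cons a rest ih =>
      intro mv
      exact le_trans (pvInnerA_ge L a _ mv) (ih _)

theorem pvFoldA_le (L M : Int) : ∀ (l : List Int) (mv : Int),
    mv ≤ M → (∀ i ∈ l, ∀ j ∈ PySem.List.pyRange 1 L 1, 1 ≤ L - i - j → i * j * (L - i - j) ≤ M) →
    l.foldl (fun mv i => pvInnerA L i (PySem.List.pyRange 1 L 1) mv) mv ≤ M := by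
  intro l
  induction l with
  | nil => intro mv h _; simpa using h
  | cons a rest ih =>
      intro mv h hall
      refine ih _ (pvInnerA_le L a M _ mv h (fun j hj hk => hall a (List.mem_cons_self ..) j hj hk)) ?_
      exact fun i hi j hj hk => hall i (List.mem_cons_of_mem _ hi) j hj hk

theorem pvFoldA_reach (L i j : Int) (hj : j ∈ PySem.List.pyRange 1 L 1) (hk : 1 ≤ L - i - j) :
    ∀ (l : List Int) (mv : Int), i ∈ l →
    i * j * (L - i - j) ≤ l.foldl (fun mv i => pvInnerA L i (PySem.List.pyRange 1 L 1) mv) mv := by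
  intro l
  induction l with
  | nil => intro mv h; cases h
  | cons a rest ih =>
      intro mv hmem
      rcases List.mem_cons.1 hmem with rfl | hmem'
      · exact le_trans (pvInnerA_reach L i _ mv j (PySem.List.pairwise_lt_pyRange_one 1 L) hj hk)
          (pvFoldA_ge L rest _)
      · exact ih _ hmem'

-- an integer with nonzero value has square at least one (parity argument helper)
theorem sq_one_of_ne (t : Int) (h : t ≠ 0) : 1 ≤ t^2 := by
  rcases lt_or_gt_of_ne h with h' | h' <;> nlinarith

theorem case0 (q i j : Int) (hq : 1 ≤ q) (hi : 1 ≤ i) (hj : 1 ≤ j) (hk : 1 ≤ 3*q - i - j) :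
    i * j * (3*q - i - j) ≤ q * q * q := by
  have h4 : 4 * (j * (3*q - i - j)) ≤ (3*q - i) * (3*q - i) := by
    nlinarith [sq_nonneg (2*j - (3*q - i))]
  have hs : i * ((3*q - i) * (3*q - i)) ≤ 4 * (q * q * q) := by
    nlinarith [mul_nonneg (sq_nonneg (i - q)) (show (0:Int) ≤ 4*q - i by omega)]
  nlinarith [mul_le_mul_of_nonneg_left h4 (show (0:Int) ≤ i by omega)]

theorem case1 (q i j : Int) (hq : 1 ≤ q) (hi : 1 ≤ i) (hj : 1 ≤ j) (hk : 1 ≤ 3*q + 1 - i - j) :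
    i * j * (3*q + 1 - i - j) ≤ q * q * (q + 1) := by
  by_cases hiq : i = q
  · subst hiq
    have h1 : 1 ≤ (2*j - (2*i + 1))^2 := sq_one_of_ne _ (by omega)
    have h4 : 4 * (j * (3*i + 1 - i - j)) ≤ (2*i + 1) * (2*i + 1) - 1 := by nlinarith
    nlinarith [mul_le_mul_of_nonneg_left h4 (show (0:Int) ≤ i by omega)]
  · have h4 : 4 * (j * (3*q + 1 - i - j)) ≤ (3*q + 1 - i) * (3*q + 1 - i) := by
      nlinarith [sq_nonneg (2*j - (3*q + 1 - i))]
    have hs : i * ((3*q + 1 - i) * (3*q + 1 - i)) ≤ 4 * (q * q * (q + 1)) := by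
      rcases (by omega : i ≤ q - 1 ∨ q + 1 ≤ i) with h' | h'
      · have hB2 : 0 ≤ 3*q^2 - (3*q+1)*i := by nlinarith [mul_nonneg (show (0:Int) ≤ q-1-i by omega) (show (0:Int) ≤ 3*q+1 by omega)]
        nlinarith [mul_nonneg (show (0:Int) ≤ q+1-i by omega) (sq_nonneg (i-q)),
          mul_nonneg (show (0:Int) ≤ q+1-i by omega) hB2]
      · have hub : i ≤ 3*q - 1 := by omega
        have hB2 : 0 ≤ (q+1)*i - q^2 + 2*q - 1 := by nlinarith [mul_nonneg (show (0:Int) ≤ i-q-1 by omega) (show (0:Int) ≤ q+1 by omega)]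
        nlinarith [mul_nonneg (sq_nonneg (i-q-1)) (show (0:Int) ≤ 3*q-1-i by omega),
          mul_nonneg (show (0:Int) ≤ i-q-1 by omega) hB2]
    nlinarith [mul_le_mul_of_nonneg_left h4 (show (0:Int) ≤ i by omega)]

theorem case2 (q i j : Int) (hq : 1 ≤ q) (hi : 1 ≤ i) (hj : 1 ≤ j) (hk : 1 ≤ 3*q + 2 - i - j) :
    i * j * (3*q + 2 - i - j) ≤ q * (q + 1) * (q + 1) := by
  by_cases hiq : i = q + 1
  · subst hiq
    have h1 : 1 ≤ (2*j - (2*q + 1))^2 := sq_one_of_ne _ (by omega)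
    have h4 : 4 * (j * (3*q + 2 - (q+1) - j)) ≤ (2*q + 1) * (2*q + 1) - 1 := by nlinarith
    nlinarith [mul_le_mul_of_nonneg_left h4 (show (0:Int) ≤ q + 1 by omega)]
  · have h4 : 4 * (j * (3*q + 2 - i - j)) ≤ (3*q + 2 - i) * (3*q + 2 - i) := by
      nlinarith [sq_nonneg (2*j - (3*q + 2 - i))]
    have hs : i * ((3*q + 2 - i) * (3*q + 2 - i)) ≤ 4 * (q * (q + 1) * (q + 1)) := by
      rcases (by omega : i ≤ q ∨ q + 2 ≤ i) with h' | h'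
      · have hB2 : 0 ≤ 3*(q+1)^2 - (3*q+2)*i := by nlinarith [mul_nonneg (show (0:Int) ≤ q-i by omega) (show (0:Int) ≤ 3*q+2 by omega)]
        nlinarith [mul_nonneg (show (0:Int) ≤ q-i by omega) (sq_nonneg (i-q-1)),
          mul_nonneg (show (0:Int) ≤ q-i by omega) hB2]
      · have hub : i ≤ 3*q := by omega
        have hB2 : 0 ≤ (q+2)*i - q^2 - 2*q - 4 := by nlinarith [mul_nonneg (show (0:Int) ≤ i-q-2 by omega) (show (0:Int) ≤ q+2 by omega)]
        nlinarith [mul_nonneg (mul_nonneg (show (0:Int) ≤ i-q by omega) (show (0:Int) ≤ i-q-2 by omega)) (show (0:Int) ≤ 3*q-i by omega),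
          mul_nonneg (show (0:Int) ≤ i-q by omega) hB2]
    nlinarith [mul_le_mul_of_nonneg_left h4 (show (0:Int) ≤ i by omega)]

-- arithmetic core packaged over the residue r
-- closed form for A's double loop, for L = 3*q + r with 1 ≤ q, 0 ≤ r ≤ 2
theorem pvMain (L q r : Int) (hL : L = 3*q + r) (hq : 1 ≤ q) (hr0 : 0 ≤ r) (hr2 : r ≤ 2) :
    get_max_volume L =
      (if r = 0 then q * q * q else if r = 1 then q * q * (q + 1) else q * (q + 1) * (q + 1)) := by
  subst hL
  have hmemq : q ∈ PySem.List.pyRange 1 (3*q + r) 1 :=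
    (PySem.List.mem_pyRange_one).mpr ⟨hq, by omega⟩
  rcases (by omega : r = 0 ∨ r = 1 ∨ r = 2) with rfl | rfl | rfl
  · rw [if_pos rfl]
    apply le_antisymm
    · apply pvFoldA_le _ _ _ _ (by positivity)
      intro i hi j hj hk
      obtain ⟨hi1, _⟩ := (PySem.List.mem_pyRange_one).mp hi
      obtain ⟨hj1, _⟩ := (PySem.List.mem_pyRange_one).mp hj
      have h := case0 q i j hq hi1 hj1 (by omega)
      nlinarith [h]
    · have h := pvFoldA_reach (3*q + 0) q q hmemq (by omega) (PySem.List.pyRange 1 (3*q + 0) 1) 0 hmemq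
      rw [show (3*q + 0 - q - q) = q by ring] at h
      exact h
  · rw [if_neg (by norm_num), if_pos rfl]
    apply le_antisymm
    · apply pvFoldA_le _ _ _ _ (by positivity)
      intro i hi j hj hk
      obtain ⟨hi1, _⟩ := (PySem.List.mem_pyRange_one).mp hi
      obtain ⟨hj1, _⟩ := (PySem.List.mem_pyRange_one).mp hj
      have h := case1 q i j hq hi1 hj1 (by omega)
      nlinarith [h]
    · have h := pvFoldA_reach (3*q + 1) q q hmemq (by omega) (PySem.List.pyRange 1 (3*q + 1) 1) 0 hmemq
      rw [show (3*q + 1 - q - q) = q + 1 by ring] at h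
      exact h
  · rw [if_neg (by norm_num), if_neg (by norm_num)]
    apply le_antisymm
    · apply pvFoldA_le _ _ _ _ (by positivity)
      intro i hi j hj hk
      obtain ⟨hi1, _⟩ := (PySem.List.mem_pyRange_one).mp hi
      obtain ⟨hj1, _⟩ := (PySem.List.mem_pyRange_one).mp hj
      have h := case2 q i j hq hi1 hj1 (by omega)
      nlinarith [h]
    · have hmemq1 : q + 1 ∈ PySem.List.pyRange 1 (3*q + 2) 1 :=
        (PySem.List.mem_pyRange_one).mpr ⟨by omega, by omega⟩
      have h := pvFoldA_reach (3*q + 2) q (q + 1) hmemq1 (by omega) (PySem.List.pyRange 1 (3*q + 2) 1) 0 hmemq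
      rw [show (3*q + 2 - q - (q + 1)) = q + 1 by ring] at h
      exact h

theorem pvA_eq_alt (L : Int) : get_max_volume L = get_max_volume_alt L := by
  by_cases hL1 : L ≤ 1
  · simp [get_max_volume, get_max_volume_alt, PySem.List.pyRange_one_eq_nil hL1,
      if_pos (show L < 3 by omega)]
  · by_cases hL2 : L = 2
    · subst hL2; decide
    · have h3 : 3 ≤ L := by omega
      have hdm := PySem.Int.floordiv_mul_add_mod L 3
      have hm : PySem.Int.mod L 3 = L % 3 := PySem.Int.mod_eq_emod_of_pos (by norm_num)
      have hr0 : 0 ≤ PySem.Int.mod L 3 := by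
        rw [hm]; exact Int.emod_nonneg L (by norm_num)
      have hr2 : PySem.Int.mod L 3 ≤ 2 := by
        rw [hm]; have := Int.emod_lt_of_pos L (show (0:Int) < 3 by norm_num); omega
      have hf : PySem.Int.floordiv L 3 = L / 3 := PySem.Int.floordiv_eq_ediv_of_pos (by norm_num)
      have hq : 1 ≤ PySem.Int.floordiv L 3 := by rw [hf]; omega
      rw [pvMain L (PySem.Int.floordiv L 3) (PySem.Int.mod L 3) (by rw [hf, hm]; omega) hq hr0 hr2,
        get_max_volume_alt, if_neg (show ¬ L < 3 by omega)]

-- ===== VERDICT (by name: the statement is the Claim_ definition above) =====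
theorem get_max_volume_spec : Claim_equal_get_max_volume := by
  intro L _
  exact pvA_eq_alt L
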